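-- pv_equiv track=rewrite | github.com/VectorG0ld/SISTEMA-LCDPR | Importação NFs Digitalizadas/Separador PDF Nota por Nota.py | choose_owner_name
-- ===== SOURCE A (Python) =====
-- def choose_owner_name(names_from_segments: list[set[str]], names_priority: list[str]) -> str | None:
--     # Junta todos os nomes encontrados e escolhe pelo primeiro que aparece na ordem de prioridade
--     union = set()
--     for s in names_from_segments:
--         union.update(s)
--     for name in names_priority:
--         if name in union:
--             return name
--     return None
-- ===== SOURCE B (Python) =====
-- def choose_owner_name(names_from_segments: list[set[str]], names_priority: list[str]) -> str | None:
--     # No union is built: test each priority name against the raw segment sets directly.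
--     return next((name for name in names_priority
--                  if any(name in s for s in names_from_segments)), None)
-- ===== Notes on version B (the rewrite author's own statement) =====
-- stated objective: simpler
-- what changed: B drops A's union-set accumulation pass entirely and instead returns the first priority name found by scanning the raw segment sets directly (next/any one-liner).
import Mathlib
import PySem

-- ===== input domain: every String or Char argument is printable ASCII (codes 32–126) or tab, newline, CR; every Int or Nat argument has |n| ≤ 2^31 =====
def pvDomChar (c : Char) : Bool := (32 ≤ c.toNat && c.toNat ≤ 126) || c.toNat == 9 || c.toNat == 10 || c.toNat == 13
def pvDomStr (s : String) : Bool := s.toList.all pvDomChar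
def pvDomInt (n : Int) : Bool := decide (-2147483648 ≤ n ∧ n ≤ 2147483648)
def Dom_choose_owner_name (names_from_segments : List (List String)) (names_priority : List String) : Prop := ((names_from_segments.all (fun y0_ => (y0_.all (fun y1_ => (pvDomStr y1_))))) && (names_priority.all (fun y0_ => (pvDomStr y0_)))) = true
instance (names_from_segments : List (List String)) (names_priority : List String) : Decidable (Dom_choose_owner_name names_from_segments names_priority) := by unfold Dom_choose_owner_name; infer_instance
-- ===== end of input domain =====

-- B drops A's union-building pass and scans the raw segment sets per priority name (simpler, same result).
-- ===== PORT A =====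
def chooseLoopA (names : List String) (union : PySem.Set String) : Option String :=
  match names with
  | [] => none
  | name :: rest => if PySem.Set.contains union name then some name else chooseLoopA rest union

def choose_owner_name (names_from_segments : List (List String)) (names_priority : List String) : Option String :=
  let union := names_from_segments.foldl (fun u s => PySem.Set.update u s) PySem.Set.empty
  chooseLoopA names_priority union

-- ===== PORT B =====
def choose_owner_name_alt (names_from_segments : List (List String)) (names_priority : List String) : Option String :=
  names_priority.find? (fun name => names_from_segments.any (fun s => s.contains name))
-- ===== PRECONDITION & SPEC =====
def Spec_choose_owner_name (names_from_segments : List (List String)) (names_priority : List String) (out : Option String) : Prop := out = choose_owner_name_alt names_from_segments names_priority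
instance (names_from_segments : List (List String)) (names_priority : List String) (out : Option String) : Decidable (Spec_choose_owner_name names_from_segments names_priority out) := by unfold Spec_choose_owner_name; infer_instance

-- ===== CLAIM (what is proved, stated in full; the proofs are below) =====
def Claim_equal_choose_owner_name : Prop := ∀ (names_from_segments : List (List String)) (names_priority : List String), Dom_choose_owner_name names_from_segments names_priority → Spec_choose_owner_name names_from_segments names_priority (choose_owner_name names_from_segments names_priority)

-- ===== LEMMAS AND PROOFS =====

-- ===== VERDICT (by name: the statement is the Claim_ definition above) =====
theorem mem_foldl_update (l : List (List String)) (u : PySem.Set String) (x : String) :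
    x ∈ l.foldl (fun u s => PySem.Set.update u s) u ↔ x ∈ u ∨ ∃ s ∈ l, x ∈ s := by
  induction l generalizing u with
  | nil => simp
  | cons h t ih => simp [ih, PySem.Set.mem_update]; tauto

theorem loopA_eq_find (segs : List (List String)) (names : List String) :
    chooseLoopA names (segs.foldl (fun u s => PySem.Set.update u s) PySem.Set.empty)
      = names.find? (fun name => segs.any (fun s => s.contains name)) := by
  induction names with
  | nil => rfl
  | cons n rest ih =>
    rw [chooseLoopA, List.find?]
    have : PySem.Set.contains (segs.foldl (fun u s => PySem.Set.update u s) PySem.Set.empty) n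
        = segs.any (fun s => s.contains n) := by
      rw [Bool.eq_iff_iff, PySem.Set.contains_iff, mem_foldl_update]
      simp [PySem.Set.empty, List.any_eq_true]
    rw [this]
    cases hb : segs.any (fun s => s.contains n)
    · simp only [Bool.false_eq_true, if_false]
      simpa using ih
    · simp

-- ===== VERDICT =====
theorem choose_owner_name_spec : Claim_equal_choose_owner_name := by
  intro segs names _
  unfold Spec_choose_owner_name choose_owner_name choose_owner_name_alt
  exact loopA_eq_find segs names
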